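-- pv_equiv track=rewrite | github.com/cziczer/Matrix-Algorithms | Lab 3_coo_to_csr_transform/main.py | coo_to_csr
-- ===== SOURCE A (Python) =====
-- def create_rowptr(rows):
--     result = []
--     current_row = 0
--     for i, x in enumerate(rows):
--         if x > current_row:
--             current_row = x
--             result.append(i+1)
--     result.append(len(rows)+1)
--
--     return result
--
-- def coo_to_csr(IRN, JCN, VAL):
--     rows = []
--     values = []
--     ICL = []
--     sorted_by_rows = sorted(zip(IRN, JCN, VAL), key=lambda key: key[0])
--     for row, column, value in sorted_by_rows:
--         ICL.append(column)
--         values.append(value)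
--         rows.append(row)
--     rows = create_rowptr(rows)
--
--     return ICL, values, rows
-- ===== SOURCE B (Python) =====
-- def coo_to_csr(IRN, JCN, VAL):
--     groups = {}
--     for r, c, v in zip(IRN, JCN, VAL):
--         groups.setdefault(r, []).append((c, v))
--     ICL, values, rowptr = [], [], []
--     current_row = 0
--     for r in sorted(groups):
--         if r > current_row:
--             current_row = r
--             rowptr.append(len(ICL) + 1)
--         for c, v in groups[r]:
--             ICL.append(c)
--             values.append(v)
--     rowptr.append(len(ICL) + 1)
--     return ICL, values, rowptr
-- ===== Notes on version B (the rewrite author's own statement) =====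
-- stated objective: alternative
-- what changed: Instead of stably sorting all n triples by row, B groups the triples by row in one dict pass and then sorts only the distinct row keys, concatenating the per-row groups in key order.
import Mathlib
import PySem

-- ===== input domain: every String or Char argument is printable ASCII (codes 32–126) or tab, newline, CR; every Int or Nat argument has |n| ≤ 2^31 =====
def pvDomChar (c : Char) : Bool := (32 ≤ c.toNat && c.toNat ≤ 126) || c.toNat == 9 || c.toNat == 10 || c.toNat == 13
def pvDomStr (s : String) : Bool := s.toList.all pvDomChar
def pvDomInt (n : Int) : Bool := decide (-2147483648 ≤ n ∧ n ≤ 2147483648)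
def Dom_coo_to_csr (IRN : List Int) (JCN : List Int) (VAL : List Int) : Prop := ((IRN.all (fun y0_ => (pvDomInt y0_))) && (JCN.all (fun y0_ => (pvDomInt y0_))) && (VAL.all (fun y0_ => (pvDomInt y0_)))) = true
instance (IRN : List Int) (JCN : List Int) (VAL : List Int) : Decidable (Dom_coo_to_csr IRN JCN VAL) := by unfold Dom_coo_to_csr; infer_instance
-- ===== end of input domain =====

-- B replaces A's full stable sort of all triples by a one-pass dict grouping by row
-- followed by a sort of the distinct row keys only (alternative strategy, same result).

-- ===== PORT A =====
def create_rowptr (rows : List Int) : List Int :=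
  -- result = [], current_row = 0; for i, x in enumerate(rows): if x > current_row: append(i+1)
  let st := rows.zipIdx.foldl
    (fun (st : List Int × Int) p => if p.1 > st.2 then (st.1 ++ [(p.2 : Int) + 1], p.1) else st)
    ([], 0)
  st.1 ++ [PySem.List.len rows + 1]

def coo_to_csr (IRN : List Int) (JCN : List Int) (VAL : List Int) : List Int × List Int × List Int :=
  let sorted_by_rows := PySem.List.sorted (IRN.zip (JCN.zip VAL)) (fun t => t.1)
  let st := sorted_by_rows.foldl
    (fun (st : List Int × List Int × List Int) t => (st.1 ++ [t.2.1], st.2.1 ++ [t.2.2], st.2.2 ++ [t.1]))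
    ([], [], [])
  (st.1, st.2.1, create_rowptr st.2.2)

-- ===== PORT B =====
def coo_to_csr_alt (IRN : List Int) (JCN : List Int) (VAL : List Int) : List Int × List Int × List Int :=
  -- groups.setdefault(r, []).append((c, v))  == modify r [] (· ++ [(c, v)])
  let groups := (IRN.zip (JCN.zip VAL)).foldl
    (fun d p => d.modify p.1 ([] : List (Int × Int)) (fun l => l ++ [p.2])) PySem.Dict.empty
  -- state: (ICL, values, rowptr, current_row)
  let st := (PySem.List.sorted groups.keys (fun x => x)).foldl
    (fun (st : List Int × List Int × List Int × Int) r =>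
      let st1 := if r > st.2.2.2 then (st.1, st.2.1, st.2.2.1 ++ [PySem.List.len st.1 + 1], r) else st
      (groups.getD r []).foldl (fun s cv => (s.1 ++ [cv.1], s.2.1 ++ [cv.2], s.2.2)) st1)
    ([], [], [], 0)
  (st.1, st.2.1, st.2.2.1 ++ [PySem.List.len st.1 + 1])

-- ===== PRECONDITION & SPEC =====
def Spec_coo_to_csr (IRN : List Int) (JCN : List Int) (VAL : List Int) (out : List Int × List Int × List Int) : Prop := out = coo_to_csr_alt IRN JCN VAL
instance (IRN : List Int) (JCN : List Int) (VAL : List Int) (out : List Int × List Int × List Int) : Decidable (Spec_coo_to_csr IRN JCN VAL out) := by unfold Spec_coo_to_csr; infer_instance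

-- ===== CLAIM (what is proved, stated in full; the proofs are below) =====
def Claim_equal_coo_to_csr : Prop := ∀ (IRN : List Int) (JCN : List Int) (VAL : List Int), Dom_coo_to_csr IRN JCN VAL → Spec_coo_to_csr IRN JCN VAL (coo_to_csr IRN JCN VAL)

-- ===== LEMMAS AND PROOFS =====

theorem pv_insertBy_cons {α : Type} (before : α → α → Bool) (x y : α) (l : List α) :
    PySem.List.insertBy before x (y :: l)
      = if before x y then x :: y :: l else y :: PySem.List.insertBy before x l := rfl

theorem pv_insertBy_append_left {α : Type} (before : α → α → Bool) (x : α) (pre post : List α)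
    (h : ∀ y ∈ pre, before x y = false) :
    PySem.List.insertBy before x (pre ++ post) = pre ++ PySem.List.insertBy before x post := by
  induction pre with
  | nil => simp
  | cons y ys ih =>
    rw [List.cons_append, pv_insertBy_cons, h y (by simp), if_neg (by simp),
      ih (fun z hz => h z (by simp [hz]))]
    simp

theorem pv_insertBy_all_before {α : Type} (before : α → α → Bool) (x : α) (ys : List α)
    (h : ∀ y ∈ ys, before x y = true) :
    PySem.List.insertBy before x ys = x :: ys := by
  cases ys with
  | nil => rfl
  | cons y t => rw [pv_insertBy_cons, h y (by simp), if_pos rfl]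

theorem pv_insert_grouped_mem (key : Int × Int × Int → Int) (x : Int × Int × Int)
    (ks : List Int) (g : Int → List (Int × Int × Int))
    (hks : ks.Pairwise (· < ·))
    (hg : ∀ k ∈ ks, ∀ t ∈ g k, key t = k)
    (hmem : key x ∈ ks) :
    PySem.List.insertBy (fun a b => decide (key a < key b)) x (ks.flatMap g)
      = ks.flatMap (fun k => g k ++ if key x == k then [x] else []) := by
  induction ks with
  | nil => simp at hmem
  | cons k rest ih =>
    rw [List.flatMap_cons, List.flatMap_cons]
    rcases List.mem_cons.mp hmem with heq | hrest
    · -- key x = k : append x after group k, rest untouched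
      rw [pv_insertBy_append_left _ _ _ _
        (fun y hy => by have := hg k (by simp) y hy; simp [this, heq]),
        pv_insertBy_all_before _ _ _ (by
          intro y hy
          obtain ⟨k', hk', hy'⟩ := List.mem_flatMap.mp hy
          have hk'' := hg k' (by simp [hk']) y hy'
          have hlt : k < k' := (List.pairwise_cons.mp hks).1 k' hk'
          simp [hk'', heq]; omega)]
      have h3 : rest.flatMap (fun k' => g k' ++ if key x == k' then [x] else [])
          = rest.flatMap g := by
        apply List.flatMap_congr
        intro k' hk'
        have hlt : k < k' := (List.pairwise_cons.mp hks).1 k' hk'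
        have : (key x == k') = false := by simp [heq]; omega
        simp [this]
      rw [h3]
      have : (key x == k) = true := by simp [heq]
      simp [this]
    · -- key x ∈ rest, so k < key x : pass through group k, recurse
      have hlt : k < key x := (List.pairwise_cons.mp hks).1 _ hrest
      rw [pv_insertBy_append_left _ _ _ _
        (fun y hy => by have := hg k (by simp) y hy; simp [this]; omega),
        ih (List.pairwise_cons.mp hks).2 (fun k' hk' => hg k' (by simp [hk'])) hrest]
      have : (key x == k) = false := by simp; omega
      simp [this]

theorem pv_insert_grouped_new (key : Int × Int × Int → Int) (x : Int × Int × Int)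
    (ks : List Int) (g : Int → List (Int × Int × Int))
    (hks : ks.Pairwise (· < ·))
    (hg : ∀ k ∈ ks, ∀ t ∈ g k, key t = k)
    (hne : ∀ k ∈ ks, g k ≠ [])
    (hmem : key x ∉ ks) :
    PySem.List.insertBy (fun a b => decide (key a < key b)) x (ks.flatMap g)
      = (PySem.List.insertBy (fun a b => decide (a < b)) (key x) ks).flatMap
          (fun k => if k == key x then [x] else g k) := by
  induction ks with
  | nil => simp [PySem.List.insertBy]
  | cons k rest ih =>
    have hne_k : k ≠ key x := fun h => hmem (by simp [h])
    by_cases hlt : key x < k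
    · -- insert before group k
      rw [List.flatMap_cons, pv_insertBy_cons, if_pos (by simp [hlt])]
      have h1 : PySem.List.insertBy (fun a b => decide (key a < key b)) x
          (g k ++ rest.flatMap g) = x :: (g k ++ rest.flatMap g) := by
        apply pv_insertBy_all_before
        intro y hy
        rcases List.mem_append.mp hy with hy1 | hy2
        · have := hg k (by simp) y hy1; simp [this, hlt]
        · obtain ⟨k', hk', hy'⟩ := List.mem_flatMap.mp hy2
          have := hg k' (by simp [hk']) y hy'
          have hlt2 : k < k' := (List.pairwise_cons.mp hks).1 k' hk'
          simp [this]; omega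
      rw [h1]
      have h2 : (k :: rest).flatMap (fun k' => if k' == key x then [x] else g k')
          = (k :: rest).flatMap g := by
        apply List.flatMap_congr
        intro k' hk'
        rcases List.mem_cons.mp hk' with h | h
        · have : (k' == key x) = false := by simp [h, hne_k]
          simp [this]
        · have hlt2 : k < k' := (List.pairwise_cons.mp hks).1 k' h
          have : (k' == key x) = false := by simp; omega
          simp [this]
      rw [List.flatMap_cons, h2]
      simp
    · -- k < key x : pass through
      have hklt : k < key x := lt_of_le_of_ne (not_lt.mp hlt) hne_k
      rw [List.flatMap_cons, pv_insertBy_append_left _ _ _ _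
          (fun y hy => by have := hg k (by simp) y hy; simp [this]; omega),
        ih (List.pairwise_cons.mp hks).2 (fun k' hk' => hg k' (by simp [hk']))
          (fun k' hk' => hne k' (by simp [hk'])) (fun h => hmem (by simp [h])),
        pv_insertBy_cons, if_neg (by simp; omega), List.flatMap_cons]
      have : (k == key x) = false := by simp [hne_k]
      simp [this]

theorem pv_sorted_eq_grouped (ts : List (Int × Int × Int)) :
    PySem.List.sorted ts (fun t => t.1)
      = (PySem.List.sorted (PySem.Set.ofList (ts.map (fun t => t.1))) (fun x => x)).flatMap
          (fun k => ts.filter (fun t => t.1 == k)) := by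
  induction ts using List.reverseRecOn with
  | nil => rfl
  | append_singleton ts x ih =>
    have hsortapp : PySem.List.sorted (ts ++ [x]) (fun t => t.1)
        = PySem.List.insertBy (fun a b => decide (a.1 < b.1)) x
            (PySem.List.sorted ts (fun t => t.1)) := by
      rw [PySem.List.sorted_eq_foldl_insertBy, PySem.List.sorted_eq_foldl_insertBy,
        List.foldl_append]
      rfl
    set ks := PySem.List.sorted (PySem.Set.ofList (ts.map (fun t => t.1))) (fun x => x) with hks_def
    have hksp : ks.Pairwise (· < ·) := PySem.List.sorted_ofList_pairwise_lt _
    have hg : ∀ k ∈ ks, ∀ t ∈ ts.filter (fun t => t.1 == k), (fun t : Int × Int × Int => t.1) t = k := by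
      intro k _ t ht
      have := List.of_mem_filter ht
      simpa using this
    have hne : ∀ k ∈ ks, ts.filter (fun t => t.1 == k) ≠ [] := by
      intro k hk
      have hk' : k ∈ ts.map (fun t => t.1) := by
        rw [hks_def] at hk
        have := (PySem.List.mem_sorted _ _ _ _).mp hk
        exact (PySem.Set.mem_ofList _ _).mp this
      obtain ⟨t, ht, htk⟩ := List.mem_map.mp hk'
      intro hnil
      have : t ∈ ts.filter (fun t => t.1 == k) := List.mem_filter.mpr ⟨ht, by simp [htk]⟩
      simp [hnil] at this
    by_cases hmem : x.1 ∈ ts.map (fun t => t.1)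
    · -- existing key: keys unchanged, x appended to its group
      have hkeys : PySem.Set.ofList ((ts ++ [x]).map (fun t => t.1))
          = PySem.Set.ofList (ts.map (fun t => t.1)) := by
        rw [List.map_append]
        simp only [PySem.Set.ofList, List.foldl_append]
        simp only [List.map_cons, List.map_nil, List.foldl_cons, List.foldl_nil]
        have hc : x.1 ∈ List.foldl PySem.Set.add PySem.Set.empty (List.map (fun t => t.1) ts) :=
          (PySem.Set.mem_ofList _ _).mpr hmem
        simp only [PySem.Set.empty] at hc
        simp [PySem.Set.add, hc]
      have hxks : x.1 ∈ ks := by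
        rw [hks_def]
        exact (PySem.List.mem_sorted _ _ _ _).mpr ((PySem.Set.mem_ofList _ _).mpr hmem)
      rw [hsortapp, ih, hkeys,
        pv_insert_grouped_mem (fun t => t.1) x ks _ hksp hg hxks]
      apply List.flatMap_congr
      intro k hk
      rw [List.filter_append]
      simp only [List.filter]
      by_cases h : x.1 = k
      · simp [h]
      · have hb : (x.1 == k) = false := by simp [h]
        rw [hb]
        simp
    · -- fresh key: it is inserted into the sorted key list, with [x] as its group
      have hxks : x.1 ∉ ks := by
        rw [hks_def]
        intro h
        exact hmem ((PySem.Set.mem_ofList _ _).mp ((PySem.List.mem_sorted _ _ _ _).mp h))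
      have hkeys : PySem.Set.ofList ((ts ++ [x]).map (fun t => t.1))
          = PySem.Set.ofList (ts.map (fun t => t.1)) ++ [x.1] := by
        rw [List.map_append]
        simp only [PySem.Set.ofList, List.foldl_append]
        simp only [List.map_cons, List.map_nil, List.foldl_cons, List.foldl_nil]
        have hc : x.1 ∉ List.foldl PySem.Set.add PySem.Set.empty (List.map (fun t => t.1) ts) := by
          intro h
          exact hmem ((PySem.Set.mem_ofList _ _).mp h)
        simp only [PySem.Set.empty] at hc
        simp [PySem.Set.add]
        intro h
        exact absurd h hc
      have hsort2 : PySem.List.sorted (PySem.Set.ofList (ts.map (fun t => t.1)) ++ [x.1]) (fun x => x)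
          = PySem.List.insertBy (fun a b => decide (a < b)) x.1 ks := by
        rw [PySem.List.sorted_eq_foldl_insertBy, List.foldl_append, hks_def,
          PySem.List.sorted_eq_foldl_insertBy]
        rfl
      have hfilnil : ts.filter (fun t => t.1 == x.1) = [] := by
        apply List.filter_eq_nil_iff.mpr
        intro t ht
        simp only [beq_iff_eq]
        intro h
        exact hmem (List.mem_map.mpr ⟨t, ht, h⟩)
      rw [hsortapp, ih, pv_insert_grouped_new (fun t => t.1) x ks _ hksp hg hne hxks,
        hkeys, hsort2]
      apply List.flatMap_congr
      intro k hk
      rcases (PySem.List.mem_insertBy _ _ _ _).mp hk with h | h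
      · subst h
        rw [List.filter_append, hfilnil]
        simp [List.filter]
      · have hneq : (k == x.1) = false := by
          simp only [beq_eq_false_iff_ne, ne_eq]
          intro he; exact hxks (he ▸ h)
        rw [List.filter_append]
        have : (x.1 == k) = false := by
          simp only [beq_eq_false_iff_ne, ne_eq]
          intro he; exact hxks (he ▸ h)
        simp [List.filter, hneq, this]

-- A's three-list building loop
theorem pv_fold3 (l : List (Int × Int × Int)) (a b c : List Int) :
    l.foldl (fun (st : List Int × List Int × List Int) t =>
        (st.1 ++ [t.2.1], st.2.1 ++ [t.2.2], st.2.2 ++ [t.1])) (a, b, c)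
      = (a ++ l.map (fun t => t.2.1), b ++ l.map (fun t => t.2.2), c ++ l.map (fun t => t.1)) := by
  induction l generalizing a b c with
  | nil => simp
  | cons t l ih => simp [ih]

-- B's inner (per-group) loop
theorem pv_fold_inner (g : List (Int × Int)) (s : List Int × List Int × List Int × Int) :
    g.foldl (fun s cv => (s.1 ++ [cv.1], s.2.1 ++ [cv.2], s.2.2)) s
      = (s.1 ++ g.map (fun cv => cv.1), s.2.1 ++ g.map (fun cv => cv.2), s.2.2) := by
  induction g generalizing s with
  | nil => simp
  | cons cv g ih => simp [ih]

-- A's rowptr loop as a function of the (value, index) stream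
def pvCrF (l : List (Int × Nat)) (s : List Int × Int) : List Int × Int :=
  l.foldl (fun (st : List Int × Int) p => if p.1 > st.2 then (st.1 ++ [(p.2 : Int) + 1], p.1) else st) s

theorem pv_crF_skip (n : Nat) (k cur : Int) (o : Nat) (r : List Int) (h : ¬ k > cur) :
    pvCrF ((List.replicate n k).zipIdx o) (r, cur) = (r, cur) := by
  induction n generalizing o with
  | zero => rfl
  | succ m ih =>
    rw [List.replicate_succ, List.zipIdx_cons]
    simp only [pvCrF, List.foldl_cons, if_neg h]
    exact ih (o + 1)

theorem pv_crF_block (n : Nat) (hn : 0 < n) (k cur : Int) (o : Nat) (r : List Int) :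
    pvCrF ((List.replicate n k).zipIdx o) (r, cur)
      = (if k > cur then r ++ [(o : Int) + 1] else r, if k > cur then k else cur) := by
  by_cases h : k > cur
  · obtain ⟨m, rfl⟩ : ∃ m, n = m + 1 := ⟨n - 1, by omega⟩
    rw [List.replicate_succ, List.zipIdx_cons]
    simp only [pvCrF, List.foldl_cons, if_pos h]
    exact pv_crF_skip m k k (o + 1) _ (by omega)
  · rw [if_neg h, if_neg h]
    exact pv_crF_skip n k cur o r h

-- B's outer loop over the sorted distinct keys, against A's rowptr stream
theorem pv_fold_outer (ks : List Int) (gp : Int → List (Int × Int))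
    (hne : ∀ k ∈ ks, gp k ≠ []) :
    ∀ (a b r : List Int) (cur : Int),
    ks.foldl (fun (st : List Int × List Int × List Int × Int) k =>
        (st.1 ++ (gp k).map (fun cv => cv.1),
         st.2.1 ++ (gp k).map (fun cv => cv.2),
         (if k > st.2.2.2 then st.2.2.1 ++ [PySem.List.len st.1 + 1] else st.2.2.1),
         (if k > st.2.2.2 then k else st.2.2.2))) (a, b, r, cur)
      = (a ++ ks.flatMap (fun k => (gp k).map (fun cv => cv.1)),
         b ++ ks.flatMap (fun k => (gp k).map (fun cv => cv.2)),
         (pvCrF ((ks.flatMap (fun k => List.replicate (gp k).length k)).zipIdx a.length) (r, cur)).1,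
         (pvCrF ((ks.flatMap (fun k => List.replicate (gp k).length k)).zipIdx a.length) (r, cur)).2) := by
  induction ks with
  | nil => intro a b r cur; simp [pvCrF]
  | cons k rest ih =>
    intro a b r cur
    have hkne : gp k ≠ [] := hne k (by simp)
    have hlen : 0 < (gp k).length := List.length_pos_iff.mpr hkne
    have happ : ∀ (l1 l2 : List (Int × Nat)) (s : List Int × Int),
        pvCrF (l1 ++ l2) s = pvCrF l2 (pvCrF l1 s) := by
      intro l1 l2 s; simp [pvCrF, List.foldl_append]
    have hblk := pv_crF_block (gp k).length hlen k cur a.length r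
    rw [List.foldl_cons, List.flatMap_cons, List.flatMap_cons, List.flatMap_cons,
      List.zipIdx_append, happ, hblk,
      ih (fun k' hk' => hne k' (by simp [hk']))]
    by_cases h : k > cur
    · simp only [if_pos h]
      simp [PySem.List.len_eq, List.length_append, List.length_map,
        List.length_replicate, List.append_assoc]
    · simp only [if_neg h]
      simp [List.length_append, List.length_map, List.length_replicate,
        List.append_assoc]

theorem pv_main (IRN JCN VAL : List Int) : coo_to_csr IRN JCN VAL = coo_to_csr_alt IRN JCN VAL := by
  unfold coo_to_csr coo_to_csr_alt create_rowptr
  set ts := IRN.zip (JCN.zip VAL) with hts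
  set gfil := fun k => ts.filter (fun t => t.1 == k) with hgfil
  set gp := fun r => (gfil r).map (fun t => t.2) with hgp
  set ks := PySem.List.sorted (PySem.Set.ofList (ts.map (fun t => t.1))) (fun x => x) with hks
  have hne : ∀ k ∈ ks, gp k ≠ [] := by
    intro k hk
    have hk' : k ∈ ts.map (fun t => t.1) :=
      (PySem.Set.mem_ofList _ _).mp ((PySem.List.mem_sorted _ _ _ _).mp hk)
    obtain ⟨t, ht, htk⟩ := List.mem_map.mp hk'
    have : t ∈ gfil k := List.mem_filter.mpr ⟨ht, by simp [htk]⟩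
    simp only [hgp]
    intro hnil
    rw [List.map_eq_nil_iff] at hnil
    simp [hnil] at this
  -- dict lookups and keys
  have hgd : ∀ r, ((ts.foldl (fun d p => d.modify p.1 ([] : List (Int × Int)) (fun l => l ++ [p.2]))
      PySem.Dict.empty).getD r []) = gp r := by
    intro r
    rw [PySem.Dict.getD_foldl_modify_append]
    simp [PySem.Dict.getD_empty, hgp, hgfil]
  have hkeys : ((ts.foldl (fun d p => d.modify p.1 ([] : List (Int × Int)) (fun l => l ++ [p.2]))
      PySem.Dict.empty).keys) = PySem.Set.ofList (ts.map (fun t => t.1)) := by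
    rw [PySem.Dict.keys_foldl_modify_key ts (fun p => p.1) ([] : List (Int × Int))
      (fun _ p => fun l => l ++ [p.2]) PySem.Dict.empty]
    rfl
  simp only [hgd, hkeys, ← hks]
  -- flatten the outer loop body and apply the simulation lemma
  have hstep : (fun (st : List Int × List Int × List Int × Int) r =>
      let st1 := if r > st.2.2.2 then (st.1, st.2.1, st.2.2.1 ++ [PySem.List.len st.1 + 1], r) else st
      (gp r).foldl (fun s cv => (s.1 ++ [cv.1], s.2.1 ++ [cv.2], s.2.2)) st1)
      = (fun (st : List Int × List Int × List Int × Int) r =>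
        (st.1 ++ (gp r).map (fun cv => cv.1),
         st.2.1 ++ (gp r).map (fun cv => cv.2),
         (if r > st.2.2.2 then st.2.2.1 ++ [PySem.List.len st.1 + 1] else st.2.2.1),
         (if r > st.2.2.2 then r else st.2.2.2))) := by
    funext st r
    by_cases h : r > st.2.2.2 <;> simp [pv_fold_inner, h]
  rw [hstep, pv_fold_outer ks gp hne [] [] [] 0]
  -- A's side: three-list loop, then the rowptr loop as pvCrF
  rw [pv_fold3]
  have hcr : ∀ (l : List (Int × Nat)) (s : List Int × Int),
      List.foldl (fun (st : List Int × Int) p =>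
        if p.1 > st.2 then (st.1 ++ [(p.2 : Int) + 1], p.1) else st) s l = pvCrF l s :=
    fun l s => rfl
  simp only [List.nil_append, hcr]
  -- stability: sorted triples = grouped triples
  have hS : PySem.List.sorted ts (fun t => t.1) = ks.flatMap gfil := pv_sorted_eq_grouped ts
  rw [hS]
  have h1 : (ks.flatMap gfil).map (fun t => t.2.1) = ks.flatMap (fun k => (gp k).map (fun cv => cv.1)) := by
    rw [List.map_flatMap]
    apply List.flatMap_congr
    intro k _
    simp [hgp, List.map_map, Function.comp]
  have h2 : (ks.flatMap gfil).map (fun t => t.2.2) = ks.flatMap (fun k => (gp k).map (fun cv => cv.2)) := by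
    rw [List.map_flatMap]
    apply List.flatMap_congr
    intro k _
    simp [hgp, List.map_map, Function.comp]
  have h3 : (ks.flatMap gfil).map (fun t => t.1) = ks.flatMap (fun k => List.replicate (gp k).length k) := by
    rw [List.map_flatMap]
    apply List.flatMap_congr
    intro k hk
    apply List.eq_replicate_iff.mpr
    constructor
    · simp [hgp]
    · intro b hb
      obtain ⟨t, ht, rfl⟩ := List.mem_map.mp hb
      have := List.of_mem_filter ht
      simpa using this
  rw [h1, h2, h3]
  have hlen : (ks.flatMap (fun k => List.replicate (gp k).length k)).length
      = (ks.flatMap (fun k => (gp k).map (fun cv => cv.1))).length := by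
    simp
  simp [PySem.List.len_eq, hlen]

-- ===== VERDICT (by name: the statement is the Claim_ definition above) =====
theorem coo_to_csr_spec : Claim_equal_coo_to_csr := by
  intro IRN JCN VAL _
  exact pv_main IRN JCN VAL
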